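/- RE-INSTANTIATED by tools/port_start.py from Prog/Jsmn/Start.lean for THE FIXED IMAGES fixed/jsmn_{d,s}.bin (namespaces FStart / FRuns). Do not edit. -/
/-
  jsmn_d.bin / jsmn_s.bin: FROM THE STUB'S FIRST INSTRUCTION TO ITS `hlt`, view level, on harness.py's layout — given the contract of jsmn_main
  (`MainSpec b n` for a layout `n` of eight 2 MB pages, Prog/Jsmn/Specs.lean). Written ONCE for a `Bin` `b` with a `Stub b` (what is known of the 54-byte stub at 100000H: the two
  walks of Prog/Jsmn/StartStub.lean); `stubFD : Stub binFD`, `stubFS : Stub binFS`.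

  THE LAYOUT (proofs/c6/harness.py, `model_main`): the image at 100000H, the parameter block at 1FF000H = [js = 200000H, len, out = 400000H,
  num_tokens], the text at 200000H (at most 1FF000H bytes), nothing else: everything behind the text reads 0 (in particular the output buffer:
  the token array at 400004H starts as `num_tokens` zero tokens), RSP = 800000H, 16 MB mapped (a layout `n : User.Layout` with `n.pages = 8`). `Layout b v0 js N` says this of a user state `v0`.

    main_pre                  EVERY hypothesis of jsmn_main's contract (`MainPre`: CallPre with the image and `b.useMain` bytes of stack, the four
                              arguments, the text, the zero token array, the three `Region`s and their disjointness) holds at the view after the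
                              stub's `call`, for every text of at most 1FF000H bytes and every `N` with 4 + sizeof(jsmntok_t) * N ≤ 3F8000H
                              (the output ends below 7F8000H, clear of the stack). NO hypothesis of the contract fails on the layout.
    main_from_start_reach     from the start view: the four loads, the `call`, jsmn_main (by `hmain`), the two stores of rax, up to the `hlt` at
                              100035H (not executed): rax = the length of `encodeResult b.cfg r ts'`, those bytes at 400000H, the image in place —
                              for WHATEVER the model (`Jsmn.parseFuel` from `Parser.init` on the zero token array) answers.
-/
import Prog.Jsmn.Fixed.Specs
import Prog.Jsmn.Fixed.StartStub

namespace X86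
namespace J6
namespace FStart
open X86.User (CodeAt RegsKept Span FlagsOK Layout toNat_add_ofNat toNat_ofNat_lt' add_ofNat_add)
open Jsmn

set_option maxRecDepth 100000
set_option maxHeartbeats 4000000
set_option linter.unusedSimpArgs false
set_option linter.unusedVariables false

/-! ### Pure facts: the zero token array, the size of the output -/

/-- `N` tokens of zero bytes: what the token array at 400004H holds when the run starts (unwritten RAM reads 0). -/
def zeroToks (N : Nat) : Tokens := List.replicate N default

theorem zeroToks_length (N : Nat) : (zeroToks N).length = N := List.length_replicate

theorem le32_length (x : Int) : (le32 x).length = 4 := rfl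

theorem bytes_length (cfg : Jsmn.Config) (t : Token) : (Token.bytes cfg t).length = cfg.tokSize := by
  unfold Token.bytes Jsmn.Config.tokSize
  cases cfg.parentLinks <;> simp [le32_length]

theorem flatMap_bytes_length (cfg : Jsmn.Config) (ts : Tokens) : (ts.flatMap (Token.bytes cfg)).length = cfg.tokSize * ts.length := by
  induction ts with
  | nil => simp
  | cons t ts ih => simp only [List.flatMap_cons, List.length_append, List.length_cons, ih, bytes_length, Nat.mul_succ]; omega

/-- The output of jsmn_main is at most 4 + sizeof(jsmntok_t) * num_tokens bytes. -/
theorem encodeResult_length_le (cfg : Jsmn.Config) (r : Int) (ts : Tokens) (N : Nat) (hr : 0 ≤ r → r ≤ N) :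
    (encodeResult cfg r ts).length ≤ 4 + cfg.tokSize * N := by
  unfold encodeResult
  by_cases h : r < 0
  · simp [h, le32_length]
  · simp only [h, if_false, List.length_append, le32_length, flatMap_bytes_length, List.length_take]
    have h1 : r.toNat ≤ N := by have := hr (by omega); omega
    have : cfg.tokSize * min r.toNat ts.length ≤ cfg.tokSize * N := Nat.mul_le_mul_left _ (by omega)
    omega

/-! ### Memory that reads 0 -/

theorem readLE_zero (μ : User.Mem) (k : Nat) : ∀ (a : Word), (∀ j, j < k → μ.read (a + UInt64.ofNat j) = 0) → μ.readLE a k = 0 := by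
  induction k with
  | zero => intro a _; rfl
  | succ k ih =>
    intro a h
    have h0 : μ.read a = 0 := by simpa using h 0 (by omega)
    have ht : μ.readLE (a + 1) k = 0 := ih (a + 1) fun j hj => by
      have e : a + 1 + UInt64.ofNat j = a + UInt64.ofNat (j + 1) := by
        rw [UInt64.ofNat_add, UInt64.add_assoc, UInt64.add_comm 1]; rfl
      rw [e]; exact h (j + 1) (by omega)
    simp only [User.Mem.readLE, h0, ht]; rfl

/-- Four bytes inside a zero region. -/
theorem readLE4_zero {μ : User.Mem} {lo hi : Nat} (Z : ∀ x : Word, lo ≤ x.toNat → x.toNat < hi → μ.read x = 0) (hhi : hi < 2 ^ 64)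
    (a : Word) (h1 : lo ≤ a.toNat) (h2 : a.toNat + 4 ≤ hi) : μ.readLE a 4 = 0 :=
  readLE_zero μ 4 a fun j hj => by
    have e : (a + UInt64.ofNat j).toNat = a.toNat + j := toNat_add_ofNat _ _ (by omega)
    exact Z _ (by omega) (by omega)

/-- The addresses of the fields of a token record. -/
theorem field_toNat (A : Word) (h : A.toNat + 20 < 2 ^ 64) :
    (A + 4).toNat = A.toNat + 4 ∧ (A + 8).toNat = A.toNat + 8 ∧ (A + 12).toNat = A.toNat + 12 ∧ (A + 16).toNat = A.toNat + 16 := by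
  refine ⟨?_, ?_, ?_, ?_⟩ <;> word_omega

/-- A zero region holds zero tokens. -/
theorem tokensAt_zero {cfg : Jsmn.Config} {μ : User.Mem} {tb : Word} {N hi : Nat}
    (Z : ∀ x : Word, tb.toNat ≤ x.toNat → x.toNat < hi → μ.read x = 0) (hhi : hi + 20 < 2 ^ 64) (hN : tb.toNat + cfg.tokSize * N ≤ hi) :
    TokensAt cfg μ tb (zeroToks N) := by
  intro i hi'
  rw [zeroToks_length] at hi'
  have hs : 16 ≤ cfg.tokSize := by unfold Jsmn.Config.tokSize; split <;> omega
  have hm := tokSize_mul_le cfg hi'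
  have ea := tokAddr_toNat cfg tb i (by omega)
  have e : (zeroToks N)[i] = default := by simp [zeroToks]
  rw [e]
  generalize tokAddr cfg tb i = A at ea
  obtain ⟨e4, e8, e12, e16⟩ := field_toNat A (by omega)
  have hhi' : hi < 2 ^ 64 := by omega
  refine ⟨?_, ?_, ?_, ?_, ?_⟩
  · rw [readLE4_zero Z hhi' A (by omega) (by omega)]; rfl
  · rw [readLE4_zero Z hhi' (A + 4) (by omega) (by omega)]; exact holds32_zero
  · rw [readLE4_zero Z hhi' (A + 8) (by omega) (by omega)]; exact holds32_zero
  · rw [readLE4_zero Z hhi' (A + 12) (by omega) (by omega)]; exact holds32_zero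
  · intro hl
    have hs' : cfg.tokSize = 20 := by unfold Jsmn.Config.tokSize; rw [hl]; rfl
    rw [readLE4_zero Z hhi' (A + 16) (by omega) (by omega)]; exact holds32_zero

/-! ### The stub of a binary, and harness.py's layout -/

/-- What is known of the stub of the image `b` (54 bytes at 100000H): the image is small, jsmn_main's stack budget, the two walks, the `hlt`. -/
structure Stub (b : Bin) : Prop where
  len : b.image.length ≤ 0x1000
  use : b.useMain ≤ 176
  head : ∀ (n : User.Layout), n.pages = 8 → ∀ (v0 : User.State) (a0 a1 a2 a3 : Word), v0.reg .rsp = 0x800000 →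
    UInt64.ofNat (v0.mem.readLE 0x1ff000 8) = a0 → UInt64.ofNat (v0.mem.readLE 0x1ff008 8) = a1 →
    UInt64.ofNat (v0.mem.readLE 0x1ff010 8) = a2 → UInt64.ofNat (v0.mem.readLE 0x1ff018 8) = a3 →
    CodeAt v0.mem 0x100000 b.image → v0.rip = 0x100000 → Reach n v0 (AtMain b.main v0 a0 a1 a2 a3)
  tail : ∀ (n : User.Layout), n.pages = 8 → ∀ v : User.State, CodeAt v.mem 0x100000 b.image → v.rip = 0x100025 → Reach n v (AtHlt v)
  hlt : ∀ μ : User.Mem, CodeAt μ 0x100000 b.image → CodeAt μ 0x100035 [0xF4]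

theorem stubFD : Stub binFD where
  len := by rw [binFD_image, JsmnFDBytes.image_bytes_length]; decide
  use := by decide
  head := fun n hn v0 a0 a1 a2 a3 hrsp h0 h1 h2 h3 himg hrip =>
    stub_head_D v0 a0 a1 a2 a3 (by omega) hrsp h0 h1 h2 h3 (JsmnFD.tjfd_start_jsmn_code himg) hrip
  tail := fun n hn v himg hrip => stub_tail_D v (by omega) (JsmnFD.tjfd_start_jsmn_code himg) hrip
  hlt := fun μ himg => CodeAt.at (bs := JsmnFDBytes.image_bytes) himg _ 0x35 1 _ (by decide) (by decide) (by decide)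

theorem stubFS : Stub binFS where
  len := by rw [binFS_image, JsmnFSBytes.image_bytes_length]; decide
  use := by decide
  head := fun n hn v0 a0 a1 a2 a3 hrsp h0 h1 h2 h3 himg hrip =>
    stub_head_S v0 a0 a1 a2 a3 (by omega) hrsp h0 h1 h2 h3 (JsmnFS.tjfs_start_jsmn_code himg) hrip
  tail := fun n hn v himg hrip => stub_tail_S v (by omega) (JsmnFS.tjfs_start_jsmn_code himg) hrip
  hlt := fun μ himg => CodeAt.at (bs := JsmnFSBytes.image_bytes) himg _ 0x35 1 _ (by decide) (by decide) (by decide)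

/-- What the start machine's view shows on harness.py's layout, for an ABSTRACT view `v0`. -/
structure Layout (b : Bin) (v0 : User.State) (js : List UInt8) (N : Nat) : Prop where
  rip : v0.rip = 0x100000
  rsp : v0.reg .rsp = 0x800000
  image : CodeAt v0.mem 0x100000 b.image
  a0 : UInt64.ofNat (v0.mem.readLE 0x1ff000 8) = 0x200000
  a1 : UInt64.ofNat (v0.mem.readLE 0x1ff008 8) = UInt64.ofNat js.length
  a2 : UInt64.ofNat (v0.mem.readLE 0x1ff010 8) = 0x400000
  a3 : UInt64.ofNat (v0.mem.readLE 0x1ff018 8) = UInt64.ofNat N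
  input : CodeAt v0.mem 0x200000 js
  zero : ∀ a : Word, 0x200000 + js.length ≤ a.toNat → v0.mem.read a = 0

section
variable {b : Bin} {n : User.Layout} {v0 v : User.State} {js : List UInt8} {N : Nat}

/-- **All hypotheses of jsmn_main's contract hold at its entry on harness.py's layout**, for every text of at most 1FF000H bytes and every
`N` whose output (4 + sizeof(jsmntok_t) * N bytes at 400000H) ends below 7F8000H. -/
theorem main_pre (hn : n.pages = 8) (hs : Stub b) (hl : Layout b v0 js N) (hjs : js.length ≤ 0x1FF000) (hN : 4 + b.cfg.tokSize * N ≤ 0x3F8000)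
    (hv : AtMain b.main v0 0x200000 (UInt64.ofNat js.length) 0x400000 (UInt64.ofNat N) v) :
    MainPre b n v 0x100025 0x200000 0x400000 js N (zeroToks N) := by
  have hlen := hs.len
  have huse := hs.use
  have hsz : 16 ≤ b.cfg.tokSize := by unfold Jsmn.Config.tokSize; split <;> omega
  have hNlt : N < 0x40000 := by
    have : 16 * N ≤ b.cfg.tokSize * N := Nat.mul_le_mul_right _ hsz
    omega
  have hsp : (v.reg .rsp).toNat = 0x7ffff8 := by rw [hv.rsp]; rfl
  have hlo : 0x100000 = 0x100000 := rfl
  have hmem : v.mem = v0.mem.writeLE 0x7ffff8 8 0x100025 := hv.mem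
  have e4 : ((0x400000 : Word) + 4).toNat = 0x400004 := by decide
  have Z : ∀ x : Word, ((0x400000 : Word) + 4).toNat ≤ x.toNat → x.toNat < 0x7f8000 → v.mem.read x = 0 := by
    intro x h1 h2
    rw [hmem, User.Mem.read_writeLE_disjoint _ _ _ _ _ (by decide) (Or.inl (by simp only [UInt64.reduceToNat]; omega))]
    exact hl.zero x (by rw [e4] at h1; omega)
  exact
    { call :=
        { img := by
            rw [hmem]
            exact CodeAt.writeLE (base := 0x100000) hl.image _ _ _ (by simp only [UInt64.reduceToNat]; omega) (by decide)
              (Or.inr (by simp only [UInt64.reduceToNat]; omega))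
          imgR := by simp only [UInt64.reduceToNat]; omega
          mapped := by omega
          nle := by omega
          rip := hv.rip
          spR := by unfold User.inRange; rw [hsp, hn]; decide
          spLo := by rw [hsp, hlo]; omega
          retAddr := by
            rw [hv.rsp, hmem, User.Mem.readLE_writeLE_same' _ _ _ _ (by decide)]
            decide
          retlt := by decide
          sImage := by right; rw [hsp]; simp only [UInt64.reduceToNat]; omega }
      rdi := hv.rdi
      rsi := hv.rsi
      rdx := hv.rdx
      rcx := by
        rw [hv.rcx]
        exact Word.low_of_lt _ (by show (UInt64.ofNat N).toNat < 2 ^ 32; rw [toNat_ofNat_lt' _ (by omega)]; omega)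
      jslt := by omega
      small := by omega
      text := by
        rw [hmem]
        exact CodeAt.writeLE hl.input _ _ _ (by simp only [UInt64.reduceToNat]; omega) (by decide)
          (Or.inr (by simp only [UInt64.reduceToNat]; omega))
      tlen := zeroToks_length N
      toks := tokensAt_zero Z (by decide) (by rw [e4]; omega)
      jsR := ⟨by rw [hlo]; decide, by rw [hn]; simp only [UInt64.reduceToNat]; omega, Or.inr (by simp only [UInt64.reduceToNat]; omega),
        Or.inl (by rw [hsp]; simp only [UInt64.reduceToNat]; omega)⟩
      outR := ⟨by rw [hlo]; decide, by rw [hn]; simp only [UInt64.reduceToNat]; omega, Or.inr (by simp only [UInt64.reduceToNat]; omega),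
        Or.inl (by rw [hsp]; simp only [UInt64.reduceToNat]; omega)⟩
      jsOut := Or.inl (by simp only [UInt64.reduceToNat]; omega) }

/-- **View level, from the stub's FIRST instruction (100000H) to its `hlt` (100035H, not executed)**, given the contract of jsmn_main: the four
loads, the `call`, jsmn_main (by `hmain`), the two stores of rax. At the `hlt`: rax = the number of output bytes, the output
`encodeResult b.cfg r ts'` (the result `r`, then `r` tokens) at 400000H — `r`, `ts'` being WHATEVER the model answers on the zero token array —
and the image still in place (so the next byte is the `hlt`). -/
theorem main_from_start_reach (hn : n.pages = 8) (hs : Stub b) (hmain : MainSpec b n) (hl : Layout b v0 js N) (hjs : js.length ≤ 0x1FF000)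
    (hN : 4 + b.cfg.tokSize * N ≤ 0x3F8000) {fuel : Nat} {r : Int} {p' : Parser} {ts' : Tokens}
    (hmodel : parseFuel b.cfg fuel js Parser.init (some (zeroToks N)) N = some (r, p', some ts')) (hr : 0 ≤ r → r ≤ N) :
    Reach n v0 (fun v => v.rip = 0x100035 ∧ v.reg .rsp = 0x800000 ∧ v.reg .rax = UInt64.ofNat (encodeResult b.cfg r ts').length ∧
      CodeAt v.mem 0x400000 (encodeResult b.cfg r ts') ∧ CodeAt v.mem 0x100000 b.image ∧ CodeAt v.mem 0x100035 [0xF4]) := by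
  have hlen := hs.len
  have huse := hs.use
  have hout := encodeResult_length_le b.cfg r ts' N hr
  refine (hs.head n hn v0 _ _ _ _ hl.rsp hl.a0 hl.a1 hl.a2 hl.a3 hl.image hl.rip).trans fun v1 hv1 => ?_
  have hpre := main_pre hn hs hl hjs hN hv1
  refine (hmain v1 0x100025 0x200000 0x400000 js N (zeroToks N) fuel r p' ts' hpre hmodel hr).trans fun v2 ⟨hpost, hrax, hcode⟩ => ?_
  have hsp1 : (v1.reg .rsp).toNat = 0x7ffff8 := by rw [hv1.rsp]; rfl
  have himg2 : CodeAt v2.mem 0x100000 b.image := by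
    refine hpost.same.codeAt hpre.call.img (by simp only [UInt64.reduceToNat]; omega) ?_
    simp only [clear_cons, clear_nil, and_true, hsp1, UInt64.reduceToNat]
    omega
  refine (hs.tail n hn v2 himg2 hpost.rip).mono fun v3 ⟨hrip3, hregs3, hmem3⟩ => ?_
  have hcode3 : CodeAt v3.mem 0x400000 (encodeResult b.cfg r ts') := by
    rw [hmem3]
    refine CodeAt.writeLE (CodeAt.writeLE hcode _ _ _ ?_ (by decide) (Or.inl (by decide))) _ _ _ ?_ (by decide) (Or.inl (by decide)) <;>
      simp only [UInt64.reduceToNat] <;> omega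
  have himg3 : CodeAt v3.mem 0x100000 b.image := by
    rw [hmem3]
    refine CodeAt.writeLE (CodeAt.writeLE himg2 _ _ _ ?_ (by decide) (Or.inr ?_)) _ _ _ ?_ (by decide) (Or.inr ?_) <;>
      simp only [UInt64.reduceToNat] <;> omega
  refine ⟨hrip3, ?_, by rw [hregs3]; exact hrax, hcode3, himg3, hs.hlt _ himg3⟩
  rw [hregs3, hpost.rsp, hv1.rsp]; decide

end

end FStart
end J6
end X86

#print axioms X86.J6.FStart.main_from_start_reach
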